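-- pv_equiv track=rewrite | github.com/johngilbert2000/nested_lookahead | make_plot.py | queries
-- ===== SOURCE A (Python) =====
-- from typing import Iterable
--
-- def queries(values, keys=None, without=None):
--     "Get `values` that contain all `keys` without any values specified in `without`"
--     if isinstance(keys, str):
--         values = [v for v in values if keys in v]
--     elif isinstance(keys, Iterable):
--         for k in keys:
--             values = [v for v in values if k in v]
--     if isinstance(without, str):
--         values = [v for v in values if without not in v]
--     elif isinstance(without, Iterable):
--         for n in without:
--             values = [v for v in values if n not in v]
--     return sorted(values)
-- ===== SOURCE B (Python) =====
-- from typing import Iterable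
--
-- def queries(values, keys=None, without=None):
--     "Get `values` that contain all `keys` without any values specified in `without`"
--     ks = [keys] if isinstance(keys, str) else list(keys) if isinstance(keys, Iterable) else []
--     ws = [without] if isinstance(without, str) else list(without) if isinstance(without, Iterable) else []
--     return sorted(v for v in values
--                   if all(k in v for k in ks) and all(w not in v for w in ws))
-- ===== Notes on version B (the rewrite author's own statement) =====
-- stated objective: simpler
-- what changed: B normalizes keys/without to plain lists once and filters values in a single pass with one combined all(...)/all(not ...) predicate, instead of A's repeated list rebuilds (one full new list per key and per without-term).
import Mathlib
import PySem

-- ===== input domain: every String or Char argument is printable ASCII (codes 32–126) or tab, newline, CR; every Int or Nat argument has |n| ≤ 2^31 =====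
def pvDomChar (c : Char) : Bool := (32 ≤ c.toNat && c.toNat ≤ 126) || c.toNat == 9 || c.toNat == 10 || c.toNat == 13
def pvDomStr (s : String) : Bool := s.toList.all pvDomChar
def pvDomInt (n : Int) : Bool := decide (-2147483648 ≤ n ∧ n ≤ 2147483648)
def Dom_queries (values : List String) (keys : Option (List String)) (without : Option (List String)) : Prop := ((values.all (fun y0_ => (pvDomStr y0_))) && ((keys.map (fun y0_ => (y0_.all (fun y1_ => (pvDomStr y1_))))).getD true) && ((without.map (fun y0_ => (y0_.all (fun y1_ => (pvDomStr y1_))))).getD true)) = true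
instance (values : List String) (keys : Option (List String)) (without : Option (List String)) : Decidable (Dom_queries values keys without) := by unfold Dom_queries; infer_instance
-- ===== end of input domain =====

-- B: one combined single-pass filter (normalized key/without lists) instead of A's repeated per-term list rebuilds; objective: simpler.
-- ===== PORT A =====
def queries (values : List String) (keys : Option (List String)) (without : Option (List String)) : List String :=
  -- `if isinstance(keys, str)` can never fire under the type convention (keys is None or a list);
  -- `elif isinstance(keys, Iterable)`: for k in keys: values = [v for v in values if k in v]
  let values1 := match keys with
    | none => values
    | some ks => ks.foldl (fun vs k => vs.filter (fun v => PySem.Str.isIn k v)) values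
  let values2 := match without with
    | none => values1
    | some ws => ws.foldl (fun vs n => vs.filter (fun v => !PySem.Str.isIn n v)) values1
  PySem.List.sorted values2 (fun v => v) false

-- ===== PORT B =====
def queries_alt (values : List String) (keys : Option (List String)) (without : Option (List String)) : List String :=
  let ks := keys.getD []
  let ws := without.getD []
  PySem.List.sorted
    (values.filter (fun v => ks.all (fun k => PySem.Str.isIn k v) && ws.all (fun w => !PySem.Str.isIn w v)))
    (fun v => v) false

-- ===== PRECONDITION & SPEC =====
def Spec_queries (values : List String) (keys : Option (List String)) (without : Option (List String)) (out : List String) : Prop := out = queries_alt values keys without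
instance (values : List String) (keys : Option (List String)) (without : Option (List String)) (out : List String) : Decidable (Spec_queries values keys without out) := by unfold Spec_queries; infer_instance

-- ===== CLAIM (what is proved, stated in full; the proofs are below) =====
def Claim_equal_queries : Prop := ∀ (values : List String) (keys : Option (List String)) (without : Option (List String)), Dom_queries values keys without → Spec_queries values keys without (queries values keys without)

-- ===== LEMMAS AND PROOFS =====

-- ===== VERDICT (by name: the statement is the Claim_ definition above) =====
-- repeated filtering by each term equals one filter by the conjunction of all terms
theorem foldl_filter_all {α β : Type} (p : β → α → Bool) (ks : List β) (vs : List α) :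
    ks.foldl (fun acc k => acc.filter (p k)) vs = vs.filter (fun v => ks.all (fun k => p k v)) := by
  induction ks generalizing vs with
  | nil => simp
  | cons k ks ih =>
    simp [List.foldl_cons, ih, List.filter_filter, Bool.and_comm]

theorem queries_spec : Claim_equal_queries := by
  intro values keys without _
  unfold Spec_queries queries queries_alt
  cases keys <;> cases without <;>
    simp [foldl_filter_all, List.filter_filter, Option.getD, List.all_nil, Bool.and_comm]
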